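-- pv_equiv track=rewrite | github.com/NoBaseCase/leetcode | python/AdventOfCode2023/day1.py | strip_number
-- ===== SOURCE A (Python) =====
-- def strip_number(str):
--     first_digit = ""
--     second_digit = ""
--     for char in str:
--         if not char.isalpha():
--             if first_digit == "":
--                 first_digit = char
--             else:
--                 second_digit = char
--     if second_digit == "":
--         return int(first_digit + first_digit)
--     return int(first_digit + second_digit)
-- ===== SOURCE B (Python) =====
-- def strip_number(str):
--     first = next((c for c in str if not c.isalpha()), '')
--     last = next((c for c in reversed(str) if not c.isalpha()), '')
--     return int(first + last)
-- ===== Notes on version B (the rewrite author's own statement) =====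
-- stated objective: idiomatic
-- what changed: A threads two mutable slots through one pass with an overwrite-the-second rule and a conditional doubling at the end; B does two short-circuit directional scans (first non-alpha from the left, first from the right) and concatenates them directly, the doubling falling out naturally.
import Mathlib
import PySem

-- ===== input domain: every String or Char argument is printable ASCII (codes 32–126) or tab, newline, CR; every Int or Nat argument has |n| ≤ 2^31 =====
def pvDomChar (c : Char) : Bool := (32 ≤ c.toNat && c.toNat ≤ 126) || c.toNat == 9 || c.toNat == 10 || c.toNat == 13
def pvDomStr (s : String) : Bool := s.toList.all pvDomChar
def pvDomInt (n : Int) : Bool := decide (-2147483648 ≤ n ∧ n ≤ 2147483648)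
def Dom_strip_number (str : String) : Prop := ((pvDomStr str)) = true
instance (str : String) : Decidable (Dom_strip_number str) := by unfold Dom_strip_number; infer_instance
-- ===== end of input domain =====

-- B replaces A's one-pass two-slot overwrite loop by two short-circuit directional scans
-- (first non-alpha from the left, first from the right) concatenated directly: same values, different decomposition.

-- ===== PORT A =====
-- A's for-loop over the characters, threading (first_digit, second_digit) as lists of chars.
def stripLoopA : List Char → List Char → List Char → List Char × List Char
  | [], f, s => (f, s)
  | c :: rest, f, s =>
    if ¬ (PySem.Chars.isalpha c = true) then
      if f = [] then stripLoopA rest [c] s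
      else stripLoopA rest f [c]
    else stripLoopA rest f s

def strip_number (str : String) : Int :=
  let fs := stripLoopA str.toList [] []
  if fs.2 = [] then (PySem.Int.ofChars? (fs.1 ++ fs.1)).getD 0
  else (PySem.Int.ofChars? (fs.1 ++ fs.2)).getD 0

-- ===== PORT B =====
def strip_number_alt (str : String) : Int :=
  let first : List Char :=
    match str.toList.find? (fun c => !PySem.Chars.isalpha c) with
    | some c => [c]
    | none => []
  let last : List Char :=
    match str.toList.reverse.find? (fun c => !PySem.Chars.isalpha c) with
    | some c => [c]
    | none => []
  (PySem.Int.ofChars? (first ++ last)).getD 0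

-- ===== PRECONDITION & SPEC =====
-- A raises ValueError when the string has no non-alphabetic character at all, or when the two
-- collected non-alphabetic characters do not parse as an int; Pre_ excludes exactly those inputs.
def Pre_strip_number (str : String) : Prop :=
  let ds := str.toList.filter (fun c => !PySem.Chars.isalpha c)
  ds ≠ [] ∧ (PySem.Int.ofChars? [ds.headD 'x', ds.getLastD 'x']).isSome = true
instance (str : String) : Decidable (Pre_strip_number str) := by unfold Pre_strip_number; infer_instance

def pvWitness_strip_number : String := "12"

def Spec_strip_number (str : String) (out : Int) : Prop := out = strip_number_alt str
instance (str : String) (out : Int) : Decidable (Spec_strip_number str out) := by unfold Spec_strip_number; infer_instance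

-- ===== CLAIM (what is proved, stated in full; the proofs are below) =====
def Claim_equal_strip_number : Prop := ∀ (str : String), Dom_strip_number str → Pre_strip_number str → Spec_strip_number str (strip_number str)

-- ===== LEMMAS AND PROOFS =====

theorem getLast?_getD_cons {α : Type} (d c : α) (r : List α) :
    (d :: r).getLast?.getD c = r.getLast?.getD d := by
  cases r with
  | nil => simp
  | cons e r' =>
    obtain ⟨x, hx⟩ := Option.isSome_iff_exists.mp
      (by simp [List.getLast?_isSome] : (e :: r').getLast?.isSome = true)
    simp [List.getLast?_cons_cons, hx]

-- Once first_digit is non-empty, A's loop keeps it and second_digit ends as the last non-alpha char.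
theorem stripLoopA_ne (l : List Char) (f s : List Char) (hf : f ≠ []) :
    stripLoopA l f s =
      (f, match l.filter (fun c => !PySem.Chars.isalpha c) with
          | [] => s
          | d :: r => [r.getLastD d]) := by
  induction l generalizing s with
  | nil => simp [stripLoopA]
  | cons c rest ih =>
    by_cases hc : PySem.Chars.isalpha c = true
    · rw [show stripLoopA (c :: rest) f s = stripLoopA rest f s from by
        simp [stripLoopA, hc], ih]
      simp [hc]
    · rw [show stripLoopA (c :: rest) f s = stripLoopA rest f [c] from by
        simp [stripLoopA, hc, hf], ih,
        show (c :: rest).filter (fun c => !PySem.Chars.isalpha c)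
           = c :: rest.filter (fun c => !PySem.Chars.isalpha c) from by
        simp [hc]]
      cases h : rest.filter (fun c => !PySem.Chars.isalpha c) with
      | nil => simp
      | cons d r => simp [List.getLastD_eq_getLast?, getLast?_getD_cons]

-- Starting empty, A's loop returns the head and (for length ≥ 2) the last of the non-alpha chars.
theorem stripLoopA_nil (l : List Char) :
    stripLoopA l [] [] =
      match l.filter (fun c => !PySem.Chars.isalpha c) with
      | [] => ([], [])
      | [d] => ([d], [])
      | d :: r => ([d], [r.getLastD d]) := by
  induction l with
  | nil => simp [stripLoopA]
  | cons c rest ih =>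
    by_cases hc : PySem.Chars.isalpha c = true
    · rw [show stripLoopA (c :: rest) [] [] = stripLoopA rest [] [] from by
        simp [stripLoopA, hc], ih]
      simp [hc]
    · rw [show stripLoopA (c :: rest) [] [] = stripLoopA rest [c] [] from by
        simp [stripLoopA, hc],
        stripLoopA_ne rest [c] [] (by simp),
        show (c :: rest).filter (fun c => !PySem.Chars.isalpha c)
           = c :: rest.filter (fun c => !PySem.Chars.isalpha c) from by
        simp [hc]]
      cases h : rest.filter (fun c => !PySem.Chars.isalpha c) with
      | nil => simp
      | cons d r => simp [List.getLastD_eq_getLast?, getLast?_getD_cons]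

theorem find?_eq_head?_filter' {α : Type} (p : α → Bool) (l : List α) :
    l.find? p = (l.filter p).head? := List.head?_filter.symm

theorem find?_reverse_eq_getLast?_filter {α : Type} (p : α → Bool) (l : List α) :
    l.reverse.find? p = (l.filter p).getLast? := by
  rw [find?_eq_head?_filter', List.filter_reverse, List.head?_reverse]

-- The two ports build the SAME two-character list before parsing; equality is unconditional.
theorem strip_number_eq_alt (str : String) : strip_number str = strip_number_alt str := by
  unfold strip_number strip_number_alt
  rw [stripLoopA_nil, find?_eq_head?_filter', find?_reverse_eq_getLast?_filter]
  cases h : str.toList.filter (fun c => !PySem.Chars.isalpha c) with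
  | nil => simp
  | cons d r =>
    cases r with
    | nil => simp
    | cons e r' =>
      simp only [List.head?_cons, List.getLast?_cons_cons, List.getLastD_eq_getLast?]
      cases hx : (e :: r').getLast? with
      | none => exact absurd (List.getLast?_eq_none_iff.mp hx) (by simp)
      | some x => simp

-- ===== VERDICT (by name: the statement is the Claim_ definition above) =====
theorem strip_number_spec : Claim_equal_strip_number := by
  intro str _ _
  unfold Spec_strip_number
  exact strip_number_eq_alt str
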